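-- pv_equiv track=rewrite | github.com/Sayeem2004/AdventOfCode | 2020/D11/2/2.py | solve
-- ===== SOURCE A (Python) =====
-- def solve(lines):
--     prev = -1; curr = 0; e = 0;
--     x = [0,1,1,1,0,-1,-1,-1];
--     y = [-1,-1,0,1,1,1,0,-1];
--     n = len(lines); m = len(lines[0]);
--     while (prev != curr):
--         prev = curr;
--         if (e%2 == 0):
--             l = [];
--             for i in range(0,n):
--                 for q in range(0,m):
--                     c = 0;
--                     for r in range(0,len(x)):
--                         i2 = i+y[r]; q2 = q+x[r];
--                         while (i2 >= 0 and i2 < n and q2 >= 0 and q2 < m):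
--                             if (lines[i2][q2] == "#"): c+=1; break;
--                             if (lines[i2][q2] == "L"): break;
--                             i2 += y[r]; q2 += x[r];
--                     if (c == 0 and lines[i][q] == "L"):
--                         curr+=1; l.append([i,q]);
--             for s in l:
--                 lines[s[0]][s[1]] = "#";
--         else:
--             l = [];
--             for i in range(0,n):
--                 for q in range(0,m):
--                     c = 0;
--                     for r in range(0,len(x)):
--                         i2 = i+y[r];
--                         q2 = q+x[r];
--                         while (i2 >= 0 and i2 < n and q2 >= 0 and q2 < m):
--                             if (lines[i2][q2] == "#"): c+=1; break;
--                             if (lines[i2][q2] == "L"): break;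
--                             i2 += y[r]; q2 += x[r];
--                     if (c >= 5 and lines[i][q] == "#"):
--                         curr-=1; l.append([i,q]);
--             for s in l:
--                 lines[s[0]][s[1]] = "L";
--         e+=1;
--     return curr;
-- ===== SOURCE B (Python) =====
-- def solve(lines):
--     n = len(lines); m = len(lines[0])
--     dirs = [(-1, 0), (-1, 1), (0, 1), (1, 1), (1, 0), (1, -1), (0, -1), (-1, -1)]
--     grid = [row[:] for row in lines]
--
--     def first_seat(i, q, dy, dx):
--         i2, q2 = i + dy, q + dx
--         while 0 <= i2 < n and 0 <= q2 < m:
--             if grid[i2][q2] in ("#", "L"):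
--                 return (i2, q2)
--             i2 += dy; q2 += dx
--         return None
--
--     nbrs = {}
--     for i in range(n):
--         for q in range(m):
--             nbrs[(i, q)] = [p for p in (first_seat(i, q, dy, dx) for dy, dx in dirs)
--                             if p is not None]
--
--     curr = 0; e = 0
--     while True:
--         if e % 2 == 0:
--             flips = [p for p, ns in nbrs.items()
--                      if grid[p[0]][p[1]] == "L" and all(grid[a][b] != "#" for a, b in ns)]
--             curr += len(flips); ch = "#"
--         else:
--             flips = [p for p, ns in nbrs.items()
--                      if grid[p[0]][p[1]] == "#" and sum(grid[a][b] == "#" for a, b in ns) >= 5]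
--             curr -= len(flips); ch = "L"
--         if not flips:
--             return curr
--         for i, q in flips:
--             grid[i][q] = ch
--         e += 1
-- ===== Notes on version B (the rewrite author's own statement) =====
-- stated objective: alternative
-- what changed: B computes each cell's visible-seat neighbour list once up front (seat positions never change), then runs every phase by counting occupied cached neighbours instead of re-walking the eight line-of-sight rays, and stops at the first phase with no flips instead of comparing the running counter; it trades A's per-phase ray walks for a one-off adjacency precompute of the same worst-case cost.
import Mathlib
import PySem

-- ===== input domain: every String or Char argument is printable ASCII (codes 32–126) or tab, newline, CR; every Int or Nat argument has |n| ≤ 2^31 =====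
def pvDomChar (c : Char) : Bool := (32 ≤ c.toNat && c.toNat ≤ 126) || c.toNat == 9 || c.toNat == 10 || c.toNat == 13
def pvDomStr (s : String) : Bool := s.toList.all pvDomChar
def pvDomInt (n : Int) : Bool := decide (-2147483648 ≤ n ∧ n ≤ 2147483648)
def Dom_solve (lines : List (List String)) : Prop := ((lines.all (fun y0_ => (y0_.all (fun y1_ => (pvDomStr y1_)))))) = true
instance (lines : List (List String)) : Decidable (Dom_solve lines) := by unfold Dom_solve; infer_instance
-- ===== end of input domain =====

-- B replaces A's per-phase line-of-sight ray walks by a visible-seat adjacency list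
-- computed once (seat positions never change); each phase then just counts occupied
-- cached neighbours (objective: alternative).  A mutates its argument in place;
-- B does not — the equivalence proved here is about the RETURN value only.
-- Both loop ports carry a fuel argument (2*3^(n*m)+2 phases, n+m+1 ray steps) purely to
-- make the recursions total in Lean; a terminating Python run never exhausts it.

-- ===== PORT A =====
-- shared grid primitives: lines[i][q] read and lines[i][q] = v write (indices are
-- guarded non-negative and in range in both Pythons wherever these are used)
def pvCell (g : List (List String)) (i q : Int) : String :=
  PySem.List.pyGetD (PySem.List.pyGetD g i []) q ""

def pvSetRow : List String → Int → String → List String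
  | [], _, _ => []
  | c :: t, q, v => if q = 0 then v :: t else c :: pvSetRow t (q - 1) v

def pvSet : List (List String) → Int → Int → String → List (List String)
  | [], _, _, _ => []
  | row :: t, i, q, v => if i = 0 then pvSetRow row q v :: t else row :: pvSet t (i - 1) q v

-- 'for s in l: lines[s[0]][s[1]] = v'
def pvApply (g : List (List String)) (l : List (Int × Int)) (v : String) : List (List String) :=
  l.foldl (fun g s => pvSet g s.1 s.2 v) g

def pvXs : List Int := [0, 1, 1, 1, 0, -1, -1, -1]
def pvYs : List Int := [-1, -1, 0, 1, 1, 1, 0, -1]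

-- A's inner 'while (i2 >= 0 and i2 < n and q2 >= 0 and q2 < m): …' ray walk
def pvWalkA (g : List (List String)) (n m dy dx : Int) : Int → Int → Nat → Int
  | _, _, 0 => 0
  | i2, q2, fuel + 1 =>
    if 0 ≤ i2 ∧ i2 < n ∧ 0 ≤ q2 ∧ q2 < m then
      if pvCell g i2 q2 = "#" then 1
      else if pvCell g i2 q2 = "L" then 0
      else pvWalkA g n m dy dx (i2 + dy) (q2 + dx) fuel
    else 0

-- 'c = 0; for r in range(0,len(x)): …' (x[r], y[r] paired up)
def pvCountA (g : List (List String)) (n m : Int) (wf : Nat) (i q : Int) : Int :=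
  (List.zip pvXs pvYs).foldl (fun c p => c + pvWalkA g n m p.2 p.1 (i + p.2) (q + p.1) wf) 0

-- the even phase's double scan collecting l and incrementing curr
def pvPhase0 (g : List (List String)) (n m : Int) (wf : Nat) (curr : Int) :
    Int × List (Int × Int) :=
  (PySem.List.pyRange 0 n 1).foldl (fun st i =>
    (PySem.List.pyRange 0 m 1).foldl (fun st q =>
      let c := pvCountA g n m wf i q
      if c = 0 ∧ pvCell g i q = "L" then (st.1 + 1, st.2 ++ [(i, q)]) else st) st)
    (curr, [])

-- the odd phase's double scan collecting l and decrementing curr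
def pvPhase1 (g : List (List String)) (n m : Int) (wf : Nat) (curr : Int) :
    Int × List (Int × Int) :=
  (PySem.List.pyRange 0 n 1).foldl (fun st i =>
    (PySem.List.pyRange 0 m 1).foldl (fun st q =>
      let c := pvCountA g n m wf i q
      if 5 ≤ c ∧ pvCell g i q = "#" then (st.1 - 1, st.2 ++ [(i, q)]) else st) st)
    (curr, [])

-- 'while (prev != curr): …'
def pvLoopA (n m : Int) (wf : Nat) : List (List String) → Int → Int → Nat → Nat → Int
  | _, _, curr, _, 0 => curr
  | g, prev, curr, e, fuel + 1 =>
    if prev ≠ curr then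
      if e % 2 = 0 then
        let r := pvPhase0 g n m wf curr
        pvLoopA n m wf (pvApply g r.2 "#") curr r.1 (e + 1) fuel
      else
        let r := pvPhase1 g n m wf curr
        pvLoopA n m wf (pvApply g r.2 "L") curr r.1 (e + 1) fuel
    else curr

def solve (lines : List (List String)) : Int :=
  let n : Int := lines.length
  let m : Int := (lines.headD []).length
  pvLoopA n m (lines.length + (lines.headD []).length + 1) lines (-1) 0 0
    (2 * 3 ^ (lines.length * (lines.headD []).length) + 2)

-- ===== PORT B =====
-- first_seat(i, q, dy, dx): the first cell holding "#" or "L" along the ray, if any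
def pvFirstSeat (g : List (List String)) (n m dy dx : Int) : Int → Int → Nat → Option (Int × Int)
  | _, _, 0 => none
  | i2, q2, fuel + 1 =>
    if 0 ≤ i2 ∧ i2 < n ∧ 0 ≤ q2 ∧ q2 < m then
      if pvCell g i2 q2 = "#" ∨ pvCell g i2 q2 = "L" then some (i2, q2)
      else pvFirstSeat g n m dy dx (i2 + dy) (q2 + dx) fuel
    else none

def pvDirs : List (Int × Int) :=
  [(-1, 0), (-1, 1), (0, 1), (1, 1), (1, 0), (1, -1), (0, -1), (-1, -1)]

-- the nbrs dict, as an association list in insertion (row-major) order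
def pvNbrs (g : List (List String)) (n m : Int) (wf : Nat) :
    List ((Int × Int) × List (Int × Int)) :=
  (PySem.List.pyRange 0 n 1).flatMap (fun i =>
    (PySem.List.pyRange 0 m 1).map (fun q =>
      ((i, q), pvDirs.filterMap (fun d => pvFirstSeat g n m d.1 d.2 (i + d.1) (q + d.2) wf))))

-- 'while True: …' with the cached adjacency
def pvLoopB (nbrs : List ((Int × Int) × List (Int × Int))) :
    List (List String) → Int → Nat → Nat → Int
  | _, curr, _, 0 => curr
  | g, curr, e, fuel + 1 =>
    if e % 2 = 0 then
      let flips := (nbrs.filter (fun pr =>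
        pvCell g pr.1.1 pr.1.2 == "L" && pr.2.all (fun p => pvCell g p.1 p.2 != "#"))).map Prod.fst
      let curr2 := curr + flips.length
      if flips = [] then curr2
      else pvLoopB nbrs (pvApply g flips "#") curr2 (e + 1) fuel
    else
      let flips := (nbrs.filter (fun pr =>
        pvCell g pr.1.1 pr.1.2 == "#" && 5 ≤ pr.2.countP (fun p => pvCell g p.1 p.2 == "#"))).map Prod.fst
      let curr2 := curr - flips.length
      if flips = [] then curr2
      else pvLoopB nbrs (pvApply g flips "L") curr2 (e + 1) fuel

def solve_alt (lines : List (List String)) : Int :=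
  let n : Int := lines.length
  let m : Int := (lines.headD []).length
  pvLoopB (pvNbrs lines n m (lines.length + (lines.headD []).length + 1)) lines 0 0
    (2 * 3 ^ (lines.length * (lines.headD []).length) + 2)

-- ===== PRECONDITION & SPEC =====
-- A raises IndexError exactly when lines is empty (lines[0]) or some row is shorter than
-- lines[0] (every in-range cell of every row is read during the first phase's ray scan).
def Pre_solve (lines : List (List String)) : Prop :=
  lines ≠ [] ∧ ∀ row ∈ lines, (lines.headD []).length ≤ row.length
instance (lines : List (List String)) : Decidable (Pre_solve lines) := by
  unfold Pre_solve; infer_instance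

def pvWitness_solve : List (List String) := [["L", ".", "L"], ["#", "L", "."]]

def Spec_solve (lines : List (List String)) (out : Int) : Prop := out = solve_alt lines
instance (lines : List (List String)) (out : Int) : Decidable (Spec_solve lines out) := by
  unfold Spec_solve; infer_instance

-- ===== CLAIM (what is proved, stated in full; the proofs are below) =====
def Claim_equal_solve : Prop :=
  ∀ (lines : List (List String)), Dom_solve lines → Pre_solve lines → Spec_solve lines (solve lines)

-- ===== LEMMAS AND PROOFS =====

-- the two grids agree on which (non-negatively indexed) cells are seats
def pvSeatEq (g g0 : List (List String)) : Prop :=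
  ∀ a b : Int, 0 ≤ a → 0 ≤ b →
    ((pvCell g a b = "#" ∨ pvCell g a b = "L") ↔ (pvCell g0 a b = "#" ∨ pvCell g0 a b = "L"))

theorem pvSeatEq_refl (g : List (List String)) : pvSeatEq g g := fun _ _ _ _ => Iff.rfl

-- A's ray walk on the current grid g finds exactly the cached visible seat (computed on g0)
theorem pvWalkA_eq_firstSeat (g g0 : List (List String)) (n m dy dx : Int)
    (hse : pvSeatEq g g0) :
    ∀ (fuel : Nat) (i2 q2 : Int),
      pvWalkA g n m dy dx i2 q2 fuel =
        (match pvFirstSeat g0 n m dy dx i2 q2 fuel with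
          | some p => if pvCell g p.1 p.2 = "#" then 1 else 0
          | none => 0) := by
  intro fuel
  induction fuel with
  | zero => intro i2 q2; simp [pvWalkA, pvFirstSeat]
  | succ f ih =>
    intro i2 q2
    rw [pvWalkA, pvFirstSeat]
    by_cases hb : 0 ≤ i2 ∧ i2 < n ∧ 0 ≤ q2 ∧ q2 < m
    · simp only [hb]
      have hiff := hse i2 q2 hb.1 hb.2.2.1
      by_cases hs0 : pvCell g0 i2 q2 = "#" ∨ pvCell g0 i2 q2 = "L"
      · have hs : pvCell g i2 q2 = "#" ∨ pvCell g i2 q2 = "L" := hiff.mpr hs0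
        simp only [hs0, if_true]
        rcases hs with h | h <;> simp [h]
      · have hs : ¬(pvCell g i2 q2 = "#" ∨ pvCell g i2 q2 = "L") := fun h => hs0 (hiff.mp h)
        push Not at hs
        simp only [hs0, if_false, hs.1, hs.2, ih]
        simp
    · simp [hb]

-- fold-sum of per-direction walks = occupied count over the cached neighbour list
theorem foldl_walk_count {α β : Type} (f : α → Option β) (P : β → Bool) (w : α → Int)
    (hw : ∀ d, w d = (match f d with | some p => if P p then 1 else 0 | none => 0)) :
    ∀ (ds : List α) (c : Int),
      ds.foldl (fun c d => c + w d) c = c + ((ds.filterMap f).countP P : Int) := by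
  intro ds
  induction ds with
  | nil => intro c; simp
  | cons d ds ih =>
    intro c
    rw [List.foldl_cons, ih, List.filterMap_cons, hw d]
    cases hfd : f d with
    | none => simp
    | some p =>
      by_cases hp : P p <;> simp [hp, List.countP_cons] <;> push_cast <;> ring

def pvNs (g0 : List (List String)) (n m : Int) (wf : Nat) (p : Int × Int) : List (Int × Int) :=
  pvDirs.filterMap (fun d => pvFirstSeat g0 n m d.1 d.2 (p.1 + d.1) (p.2 + d.2) wf)

theorem pvCountA_eq (g g0 : List (List String)) (n m : Int) (wf : Nat) (i q : Int)
    (hse : pvSeatEq g g0) :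
    pvCountA g n m wf i q =
      ((pvNs g0 n m wf (i, q)).countP (fun p => pvCell g p.1 p.2 == "#") : Int) := by
  unfold pvCountA
  rw [foldl_walk_count
      (fun p : Int × Int => pvFirstSeat g0 n m p.2 p.1 (i + p.2) (q + p.1) wf)
      (fun p : Int × Int => pvCell g p.1 p.2 == "#")
      (fun p : Int × Int => pvWalkA g n m p.2 p.1 (i + p.2) (q + p.1) wf)
      (fun d => by
        beta_reduce
        rw [pvWalkA_eq_firstSeat g g0 n m d.2 d.1 hse]
        cases pvFirstSeat g0 n m d.2 d.1 (i + d.2) (q + d.1) wf with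
        | none => rfl
        | some p => by_cases h : pvCell g p.1 p.2 = "#" <;> simp [h])]
  rw [zero_add]
  rfl

theorem pvSetRow_getD (v : String) :
    ∀ (row : List String) (b y : Int), 0 ≤ y →
      (pvSetRow row b v).getD y.toNat "" = row.getD y.toNat "" ∨
        (y = b ∧ (pvSetRow row b v).getD y.toNat "" = v) := by
  intro row
  induction row with
  | nil => intro b y _; left; simp [pvSetRow]
  | cons c t ih =>
    intro b y hy
    rw [pvSetRow]
    by_cases hb : b = 0
    · subst hb
      simp only [if_pos rfl]
      by_cases hy0 : y = 0
      · subst hy0; right; exact ⟨rfl, rfl⟩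
      · left
        have : y.toNat = (y.toNat - 1) + 1 := by omega
        rw [this]; simp
    · rw [if_neg hb]
      by_cases hy0 : y = 0
      · subst hy0; left; simp
      · have hty : y.toNat = (y - 1).toNat + 1 := by omega
        rcases ih (b - 1) (y - 1) (by omega) with h | ⟨he, h⟩
        · left; rw [hty]; simpa using h
        · right; exact ⟨by omega, by rw [hty]; simpa using h⟩

-- writing one cell changes nothing else; at (a,b) it writes v
theorem pvCell_pvSet_cases (g : List (List String)) (a b x y : Int) (v : String)
    (hx : 0 ≤ x) (hy : 0 ≤ y) :
    pvCell (pvSet g a b v) x y = pvCell g x y ∨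
      (x = a ∧ y = b ∧ pvCell (pvSet g a b v) x y = v) := by
  induction g generalizing a x with
  | nil => left; rfl
  | cons row t ih =>
    rw [pvSet]
    by_cases ha : a = 0
    · subst ha
      rw [if_pos rfl]
      by_cases hx0 : x = 0
      · subst hx0
        unfold pvCell
        simp only [PySem.List.pyGetD_zero_cons]
        rw [PySem.List.pyGetD_of_nonneg _ _ hy, PySem.List.pyGetD_of_nonneg _ _ hy]
        rcases pvSetRow_getD v row b y hy with h | ⟨he, h⟩
        · left; exact h
        · right; exact ⟨by simp, he, h⟩
      · left
        unfold pvCell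
        rw [PySem.List.pyGetD_of_nonneg _ _ hx, PySem.List.pyGetD_of_nonneg _ _ hx]
        have : x.toNat = (x.toNat - 1) + 1 := by omega
        rw [this]; simp
    · rw [if_neg ha]
      by_cases hx0 : x = 0
      · subst hx0; left
        unfold pvCell
        simp only [PySem.List.pyGetD_zero_cons]
      · have hxt : x.toNat = (x - 1).toNat + 1 := by omega
        rcases ih (a - 1) (x - 1) (by omega) with h | ⟨he, h2, h3⟩
        · left
          unfold pvCell at h ⊢
          rw [PySem.List.pyGetD_of_nonneg _ _ hx, PySem.List.pyGetD_of_nonneg _ _ hx, hxt]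
          simp only [List.getD_cons_succ]
          rwa [PySem.List.pyGetD_of_nonneg _ _ (by omega : (0:Int) ≤ x - 1),
               PySem.List.pyGetD_of_nonneg _ _ (by omega : (0:Int) ≤ x - 1)] at h
        · right
          refine ⟨by omega, h2, ?_⟩
          unfold pvCell at h3 ⊢
          rw [PySem.List.pyGetD_of_nonneg _ _ hx, hxt]
          simp only [List.getD_cons_succ]
          rwa [PySem.List.pyGetD_of_nonneg _ _ (by omega : (0:Int) ≤ x - 1)] at h3

-- flipping seats to "#"/"L" preserves the seat map
theorem pvSeatEq_apply (g g0 : List (List String)) (l : List (Int × Int)) (v : String)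
    (hv : v = "#" ∨ v = "L") (hse : pvSeatEq g g0)
    (hl : ∀ p ∈ l, 0 ≤ p.1 ∧ 0 ≤ p.2 ∧ (pvCell g p.1 p.2 = "#" ∨ pvCell g p.1 p.2 = "L")) :
    pvSeatEq (pvApply g l v) g0 := by
  induction l generalizing g with
  | nil => exact hse
  | cons p l ih =>
    show pvSeatEq (pvApply (pvSet g p.1 p.2 v) l v) g0
    have hp := hl p (List.mem_cons_self)
    have hse1 : pvSeatEq (pvSet g p.1 p.2 v) g0 := by
      intro x y hx hy
      rcases pvCell_pvSet_cases g p.1 p.2 x y v hx hy with h | ⟨_, _, h⟩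
      · rw [h]; exact hse x y hx hy
      · constructor
        · intro _
          exact (hse x y hx hy).mp (by subst_vars; exact hp.2.2)
        · intro _; rw [h]; exact hv
    refine ih (pvSet g p.1 p.2 v) hse1 ?_
    intro q hq
    have hq0 := hl q (List.mem_cons_of_mem p hq)
    refine ⟨hq0.1, hq0.2.1, ?_⟩
    rcases pvCell_pvSet_cases g p.1 p.2 q.1 q.2 v hq0.1 hq0.2.1 with h | ⟨_, _, h⟩
    · rw [h]; exact hq0.2.2
    · rw [h]; exact hv

theorem pvLoopA_stable (n m : Int) (wf : Nat) (g : List (List String)) (c : Int) (e : Nat) :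
    ∀ fuel, pvLoopA n m wf g c c e fuel = c := by
  intro fuel; cases fuel <;> simp [pvLoopA]

-- A's scan, flattened and in closed form
def pvCells (n m : Int) : List (Int × Int) :=
  (PySem.List.pyRange 0 n 1).flatMap (fun i => (PySem.List.pyRange 0 m 1).map (fun q => (i, q)))

theorem foldl_collect {α : Type} (P : α → Prop) [DecidablePred P] (δ : Int) :
    ∀ (xs : List α) (c : Int) (l : List α),
      xs.foldl (fun st a => if P a then (st.1 + δ, st.2 ++ [a]) else st) (c, l) =
        (c + δ * (xs.countP (fun a => decide (P a)) : Int),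
          l ++ xs.filter (fun a => decide (P a))) := by
  intro xs
  induction xs with
  | nil => intro c l; simp
  | cons a xs ih =>
    intro c l
    rw [List.foldl_cons]
    by_cases hp : P a
    · simp only [hp, if_true, ih, List.countP_cons, List.filter_cons, decide_true]
      refine Prod.ext ?_ ?_
      · show c + δ + δ * ((xs.countP _ : Nat) : Int) = _
        push_cast; ring
      · simp
    · simp only [hp, if_false, ih, List.countP_cons, List.filter_cons, decide_false]
      simp

theorem phase0_closed (g : List (List String)) (n m : Int) (wf : Nat) (curr : Int) :
    pvPhase0 g n m wf curr =
      (curr + ((pvCells n m).countP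
          (fun p => decide (pvCountA g n m wf p.1 p.2 = 0 ∧ pvCell g p.1 p.2 = "L")) : Int),
        (pvCells n m).filter
          (fun p => decide (pvCountA g n m wf p.1 p.2 = 0 ∧ pvCell g p.1 p.2 = "L"))) := by
  unfold pvPhase0
  have : pvPhase0 g n m wf curr =
      (pvCells n m).foldl (fun st p =>
        if pvCountA g n m wf p.1 p.2 = 0 ∧ pvCell g p.1 p.2 = "L"
        then (st.1 + 1, st.2 ++ [p]) else st) (curr, []) := by
    unfold pvPhase0 pvCells
    rw [List.foldl_flatMap]
    simp only [List.foldl_map]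
  rw [← pvPhase0, this,
    foldl_collect (fun p : Int × Int => pvCountA g n m wf p.1 p.2 = 0 ∧ pvCell g p.1 p.2 = "L") 1]
  simp

theorem phase1_closed (g : List (List String)) (n m : Int) (wf : Nat) (curr : Int) :
    pvPhase1 g n m wf curr =
      (curr - ((pvCells n m).countP
          (fun p => decide (5 ≤ pvCountA g n m wf p.1 p.2 ∧ pvCell g p.1 p.2 = "#")) : Int),
        (pvCells n m).filter
          (fun p => decide (5 ≤ pvCountA g n m wf p.1 p.2 ∧ pvCell g p.1 p.2 = "#"))) := by
  have : pvPhase1 g n m wf curr =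
      (pvCells n m).foldl (fun st p =>
        if 5 ≤ pvCountA g n m wf p.1 p.2 ∧ pvCell g p.1 p.2 = "#"
        then (st.1 + (-1), st.2 ++ [p]) else st) (curr, []) := by
    unfold pvPhase1 pvCells
    rw [List.foldl_flatMap]
    simp only [List.foldl_map]
    norm_num [sub_eq_add_neg]
  rw [this,
    foldl_collect (fun p : Int × Int => 5 ≤ pvCountA g n m wf p.1 p.2 ∧ pvCell g p.1 p.2 = "#") (-1)]
  norm_num [sub_eq_add_neg]

-- B's nbrs list is the cell list decorated with cached neighbour lists
theorem pvNbrs_eq_map (g0 : List (List String)) (n m : Int) (wf : Nat) :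
    pvNbrs g0 n m wf = (pvCells n m).map (fun p => (p, pvNs g0 n m wf p)) := by
  unfold pvNbrs pvCells pvNs
  simp only [List.map_flatMap, List.map_map]
  rfl

-- B's flips list = A's collected l, phase 0 (under the seat-map invariant)
theorem flips0_eq (g g0 : List (List String)) (n m : Int) (wf : Nat) (hse : pvSeatEq g g0) :
    ((pvNbrs g0 n m wf).filter (fun pr =>
        pvCell g pr.1.1 pr.1.2 == "L" && pr.2.all (fun p => pvCell g p.1 p.2 != "#"))).map Prod.fst =
      (pvCells n m).filter
        (fun p => decide (pvCountA g n m wf p.1 p.2 = 0 ∧ pvCell g p.1 p.2 = "L")) := by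
  rw [pvNbrs_eq_map, List.filter_map, List.map_map]
  have h1 : (Prod.fst ∘ fun p : Int × Int => (p, pvNs g0 n m wf p)) = id := rfl
  rw [h1, List.map_id]
  refine List.filter_congr ?_
  intro p _
  show (pvCell g p.1 p.2 == "L" && (pvNs g0 n m wf p).all (fun x => pvCell g x.1 x.2 != "#")) =
    decide (pvCountA g n m wf p.1 p.2 = 0 ∧ pvCell g p.1 p.2 = "L")
  rw [pvCountA_eq g g0 n m wf p.1 p.2 hse]
  rw [Bool.eq_iff_iff]
  simp only [Bool.and_eq_true, beq_iff_eq, bne_iff_ne, List.all_eq_true, decide_eq_true_eq,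
    Nat.cast_eq_zero, List.countP_eq_zero, ne_eq]
  tauto

-- B's flips list = A's collected l, phase 1
theorem flips1_eq (g g0 : List (List String)) (n m : Int) (wf : Nat) (hse : pvSeatEq g g0) :
    ((pvNbrs g0 n m wf).filter (fun pr =>
        pvCell g pr.1.1 pr.1.2 == "#" && 5 ≤ pr.2.countP (fun p => pvCell g p.1 p.2 == "#"))).map Prod.fst =
      (pvCells n m).filter
        (fun p => decide (5 ≤ pvCountA g n m wf p.1 p.2 ∧ pvCell g p.1 p.2 = "#")) := by
  rw [pvNbrs_eq_map, List.filter_map, List.map_map]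
  have h1 : (Prod.fst ∘ fun p : Int × Int => (p, pvNs g0 n m wf p)) = id := rfl
  rw [h1, List.map_id]
  refine List.filter_congr ?_
  intro p _
  show (pvCell g p.1 p.2 == "#" && decide (5 ≤ (pvNs g0 n m wf p).countP (fun x => pvCell g x.1 x.2 == "#"))) =
    decide (5 ≤ pvCountA g n m wf p.1 p.2 ∧ pvCell g p.1 p.2 = "#")
  rw [pvCountA_eq g g0 n m wf p.1 p.2 hse]
  rw [Bool.eq_iff_iff]
  simp only [Bool.and_eq_true, beq_iff_eq, decide_eq_true_eq]
  constructor
  · rintro ⟨h1, h2⟩; exact ⟨by exact_mod_cast h2, h1⟩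
  · rintro ⟨h1, h2⟩; exact ⟨h2, by exact_mod_cast h1⟩

-- cells collected in either phase are in-range seats
theorem flips_sound (g : List (List String)) (n m : Int) (P : Int × Int → Prop)
    [DecidablePred P] (hP : ∀ p, P p → (pvCell g p.1 p.2 = "#" ∨ pvCell g p.1 p.2 = "L")) :
    ∀ p ∈ (pvCells n m).filter (fun p => decide (P p)),
      0 ≤ p.1 ∧ 0 ≤ p.2 ∧ (pvCell g p.1 p.2 = "#" ∨ pvCell g p.1 p.2 = "L") := by
  intro p hp
  rw [List.mem_filter] at hp
  have hc := hp.1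
  unfold pvCells at hc
  rw [List.mem_flatMap] at hc
  obtain ⟨i, hi, hq⟩ := hc
  rw [List.mem_map] at hq
  obtain ⟨q, hq, rfl⟩ := hq
  rw [PySem.List.mem_pyRange_one] at hi hq
  exact ⟨hi.1, hq.1, hP _ (of_decide_eq_true hp.2)⟩

-- the main loop correspondence
theorem pvLoop_eq (g0 : List (List String)) (n m : Int) (wf : Nat) :
    ∀ (fuel : Nat) (g : List (List String)) (prev curr : Int) (e : Nat),
      pvSeatEq g g0 → prev ≠ curr →
      pvLoopA n m wf g prev curr e (fuel + 1) =
        pvLoopB (pvNbrs g0 n m wf) g curr e (fuel + 1) := by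
  intro fuel
  induction fuel with
  | zero =>
    intro g prev curr e hse hne
    rw [pvLoopA, pvLoopB, if_pos hne]
    by_cases he : e % 2 = 0
    · simp only [he, if_true]
      rw [phase0_closed, flips0_eq g g0 n m wf hse]
      simp only [List.countP_eq_length_filter, pvLoopA]
      by_cases hnil :
        (pvCells n m).filter
          (fun p => decide (pvCountA g n m wf p.1 p.2 = 0 ∧ pvCell g p.1 p.2 = "L")) = []
      · rw [if_pos hnil]
      · rw [if_neg hnil]
        simp only [pvLoopB]
    · simp only [if_neg he]
      rw [phase1_closed, flips1_eq g g0 n m wf hse]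
      simp only [List.countP_eq_length_filter, pvLoopA]
      by_cases hnil :
        (pvCells n m).filter
          (fun p => decide (5 ≤ pvCountA g n m wf p.1 p.2 ∧ pvCell g p.1 p.2 = "#")) = []
      · rw [if_pos hnil]
      · rw [if_neg hnil]
        simp only [pvLoopB]
  | succ f ih =>
    intro g prev curr e hse hne
    rw [pvLoopA, pvLoopB, if_pos hne]
    by_cases he : e % 2 = 0
    · simp only [he, if_true]
      rw [phase0_closed, flips0_eq g g0 n m wf hse]
      simp only [List.countP_eq_length_filter]
      by_cases hnil :
        (pvCells n m).filter
          (fun p => decide (pvCountA g n m wf p.1 p.2 = 0 ∧ pvCell g p.1 p.2 = "L")) = []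
      · rw [if_pos hnil, hnil]
        simp only [List.length_nil, Nat.cast_zero, add_zero, List.foldl_nil, pvApply]
        exact pvLoopA_stable n m wf g curr (e + 1) (f + 1)
      · rw [if_neg hnil]
        refine ih (pvApply g _ "#") curr _ (e + 1) ?_ ?_
        · refine pvSeatEq_apply g g0 _ "#" (Or.inl rfl) hse ?_
          exact flips_sound g n m _ (fun p hp => Or.inr hp.2)
        · have : (List.filter
              (fun p => decide (pvCountA g n m wf p.1 p.2 = 0 ∧ pvCell g p.1 p.2 = "L"))
              (pvCells n m)).length ≠ 0 := by
            simpa [List.length_eq_zero_iff] using hnil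
          omega
    · simp only [if_neg he]
      rw [phase1_closed, flips1_eq g g0 n m wf hse]
      simp only [List.countP_eq_length_filter]
      by_cases hnil :
        (pvCells n m).filter
          (fun p => decide (5 ≤ pvCountA g n m wf p.1 p.2 ∧ pvCell g p.1 p.2 = "#")) = []
      · rw [if_pos hnil, hnil]
        simp only [List.length_nil, Nat.cast_zero, sub_zero, List.foldl_nil, pvApply]
        exact pvLoopA_stable n m wf g curr (e + 1) (f + 1)
      · rw [if_neg hnil]
        refine ih (pvApply g _ "L") curr _ (e + 1) ?_ ?_
        · refine pvSeatEq_apply g g0 _ "L" (Or.inr rfl) hse ?_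
          exact flips_sound g n m _ (fun p hp => Or.inl hp.2)
        · have : (List.filter
              (fun p => decide (5 ≤ pvCountA g n m wf p.1 p.2 ∧ pvCell g p.1 p.2 = "#"))
              (pvCells n m)).length ≠ 0 := by
            simpa [List.length_eq_zero_iff] using hnil
          omega

-- ===== VERDICT (by name: the statement is the Claim_ definition above) =====
theorem solve_spec : Claim_equal_solve := by
  intro lines _ _
  show solve lines = solve_alt lines
  unfold solve solve_alt
  exact pvLoop_eq lines _ _ _ _ lines (-1) 0 0 (pvSeatEq_refl lines) (by decide)
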